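-- pv_equiv track=rewrite | github.com/yline/LeetCode | python_pycharm/leetcode/726NumberOfAtoms/solution.py | __parse_right_bracket
-- ===== SOURCE A (Python) =====
-- def __parse_right_bracket(formula: str, index: int):
--     move = 1  # 移动个数
--     size = 1  # 倍数
--
--     numbering = False
--
--     # 解析元素
--     index += 1
--     while index != formula.__len__() and ('0' <= formula[index] <= '9'):
--         if not numbering:  # 首次进入数字
--             size = ord(formula[index]) - ord('0')
--             move += 1
--             index += 1
--             numbering = True
--         else:  # 非首次进入数字，需要算乘法了
--             size = size * 10 + ord(formula[index]) - ord('0')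
--             move += 1
--             index += 1
--     return move, size
-- ===== SOURCE B (Python) =====
-- def __parse_right_bracket(formula: str, index: int):
--     j = index + 1
--     ds = []
--     while j != len(formula) and '0' <= formula[j] <= '9':
--         ds.append(ord(formula[j]) - 48)
--         j += 1
--     if not ds:
--         return 1, 1
--     size = sum(d * 10 ** k for k, d in enumerate(reversed(ds)))
--     return 1 + len(ds), size
-- ===== Notes on version B (the rewrite author's own statement) =====
-- stated objective: alternative
-- what changed: B collects the digit span first with no value arithmetic in the scan, then converts it once by a positional power-of-ten sum, replacing A's in-loop Horner accumulation with its first-digit 'numbering' flag.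
import Mathlib
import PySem

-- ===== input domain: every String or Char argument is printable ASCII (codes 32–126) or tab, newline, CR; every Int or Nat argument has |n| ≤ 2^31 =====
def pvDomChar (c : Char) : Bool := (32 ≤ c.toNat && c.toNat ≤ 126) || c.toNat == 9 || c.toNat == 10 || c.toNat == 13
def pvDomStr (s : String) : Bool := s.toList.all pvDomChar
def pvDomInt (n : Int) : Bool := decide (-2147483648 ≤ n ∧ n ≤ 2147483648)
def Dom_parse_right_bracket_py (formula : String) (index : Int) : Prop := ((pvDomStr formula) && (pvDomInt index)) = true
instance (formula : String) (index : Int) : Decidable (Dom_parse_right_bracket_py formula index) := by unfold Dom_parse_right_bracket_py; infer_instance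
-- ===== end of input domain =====

-- B replaces A's in-loop Horner accumulation (with its 'numbering' flag) by a plain digit-span
-- scan followed by one positional power-of-ten conversion: a different decomposition, same cost.


-- termination helper used by both ports' loops
theorem pv_lt_of_pyGet?_some {α : Type} {xs : List α} {i : Int} {x : α}
    (h : PySem.List.pyGet? xs i = some x) : i < (xs.length : Int) := by
  by_cases hr : PySem.Raise.InRange xs.length i
  · unfold PySem.Raise.InRange at hr; omega
  · rw [(PySem.List.pyGet?_eq_none_iff xs i).2 hr] at h; cases h

-- ===== PORT A =====
-- the while loop of A: state (index, move, size, numbering)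
def pvA_loop (cs : List Char) (j move size : Int) (numbering : Bool) : Int × Int :=
  if j = (cs.length : Int) then (move, size)
  else
    match h : PySem.List.pyGet? cs j with
    | some c =>
      if '0' ≤ c ∧ c ≤ '9' then
        if numbering then
          pvA_loop cs (j + 1) (move + 1) (size * 10 + ((c.toNat : Int) - 48)) true
        else
          pvA_loop cs (j + 1) (move + 1) ((c.toNat : Int) - 48) true
      else (move, size)
    | none => (move, size)  -- unreachable under Pre_ (Python would raise IndexError)
termination_by ((cs.length : Int) - j).toNat
decreasing_by
  all_goals have hj := pv_lt_of_pyGet?_some h; omega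

def parse_right_bracket_py (formula : String) (index : Int) : Int × Int :=
  pvA_loop formula.toList (index + 1) 1 1 false

-- ===== PORT B =====
-- B's scan loop: only collects the digit values of the span, no arithmetic
def pvB_scan (cs : List Char) (j : Int) : List Int :=
  if j = (cs.length : Int) then []
  else
    match h : PySem.List.pyGet? cs j with
    | some c =>
      if '0' ≤ c ∧ c ≤ '9' then ((c.toNat : Int) - 48) :: pvB_scan cs (j + 1)
      else []
    | none => []  -- unreachable under Pre_
termination_by ((cs.length : Int) - j).toNat
decreasing_by
  all_goals have hj := pv_lt_of_pyGet?_some h; omega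

def parse_right_bracket_py_alt (formula : String) (index : Int) : Int × Int :=
  let ds := pvB_scan formula.toList (index + 1)
  if ds = [] then (1, 1)
  else (1 + (ds.length : Int),
        (ds.reverse.zipIdx.map (fun p => p.1 * 10 ^ p.2)).sum)

-- ===== PRECONDITION & SPEC =====
-- Pre_ excludes exactly the inputs where Python A raises IndexError: index+1 beyond the string
-- on either side (index+1 > len(formula) or index+1 < -len(formula)).
def Pre_parse_right_bracket_py (formula : String) (index : Int) : Prop :=
  -(formula.toList.length : Int) ≤ index + 1 ∧ index + 1 ≤ (formula.toList.length : Int)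
instance (formula : String) (index : Int) : Decidable (Pre_parse_right_bracket_py formula index) := by
  unfold Pre_parse_right_bracket_py; infer_instance

def pvWitness_parse_right_bracket_py : String × Int := ("(H2)24", 3)

def Spec_parse_right_bracket_py (formula : String) (index : Int) (out : Int × Int) : Prop :=
  out = parse_right_bracket_py_alt formula index
instance (formula : String) (index : Int) (out : Int × Int) : Decidable (Spec_parse_right_bracket_py formula index out) := by
  unfold Spec_parse_right_bracket_py; infer_instance

-- ===== CLAIM (what is proved, stated in full; the proofs are below) =====
def Claim_equal_parse_right_bracket_py : Prop := ∀ (formula : String) (index : Int), Dom_parse_right_bracket_py formula index → Pre_parse_right_bracket_py formula index → Spec_parse_right_bracket_py formula index (parse_right_bracket_py formula index)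

-- ===== LEMMAS AND PROOFS =====

-- step equations for the two loops (the definitions use a dependent match on pyGet?)
theorem pvB_scan_base (cs : List Char) : pvB_scan cs (cs.length : Int) = [] := by
  unfold pvB_scan; simp

theorem pvB_scan_some (cs : List Char) (j : Int) (c : Char)
    (hj : j ≠ (cs.length : Int)) (h : PySem.List.pyGet? cs j = some c) :
    pvB_scan cs j
      = if '0' ≤ c ∧ c ≤ '9' then ((c.toNat : Int) - 48) :: pvB_scan cs (j + 1) else [] := by
  conv_lhs => rw [pvB_scan]
  rw [if_neg hj]; split <;> simp_all

theorem pvB_scan_none (cs : List Char) (j : Int)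
    (hj : j ≠ (cs.length : Int)) (h : PySem.List.pyGet? cs j = none) :
    pvB_scan cs j = [] := by
  conv_lhs => rw [pvB_scan]
  rw [if_neg hj]; split <;> simp_all

theorem pvA_loop_base (cs : List Char) (move size : Int) (b : Bool) :
    pvA_loop cs (cs.length : Int) move size b = (move, size) := by
  unfold pvA_loop; simp

theorem pvA_loop_some (cs : List Char) (j move size : Int) (b : Bool) (c : Char)
    (hj : j ≠ (cs.length : Int)) (h : PySem.List.pyGet? cs j = some c) :
    pvA_loop cs j move size b
      = if '0' ≤ c ∧ c ≤ '9' then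
          (if b then pvA_loop cs (j + 1) (move + 1) (size * 10 + ((c.toNat : Int) - 48)) true
           else pvA_loop cs (j + 1) (move + 1) ((c.toNat : Int) - 48) true)
        else (move, size) := by
  conv_lhs => rw [pvA_loop]
  rw [if_neg hj]; split <;> simp_all

theorem pvA_loop_none (cs : List Char) (j move size : Int) (b : Bool)
    (hj : j ≠ (cs.length : Int)) (h : PySem.List.pyGet? cs j = none) :
    pvA_loop cs j move size b = (move, size) := by
  conv_lhs => rw [pvA_loop]
  rw [if_neg hj]; split <;> simp_all

-- positional power-of-ten sum of the collected digits equals a Horner fold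
theorem pv_horner_eq_possum (ds : List Int) : ∀ s : Int,
    ds.foldl (fun a d => a * 10 + d) s
      = s * 10 ^ ds.length + (ds.reverse.zipIdx.map (fun p => p.1 * 10 ^ p.2)).sum := by
  induction ds with
  | nil => intro s; simp
  | cons d tl ih =>
    intro s
    simp only [List.foldl_cons, ih, List.reverse_cons, List.zipIdx_append, List.map_append,
      List.sum_append, List.length_cons, List.length_reverse]
    simp [List.zipIdx]
    ring

-- A's loop in the 'numbering = true' state folds the remaining digit span onto size
theorem pvA_loop_true (cs : List Char) (j : Int) : ∀ move size : Int,
    pvA_loop cs j move size true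
      = (move + ((pvB_scan cs j).length : Int),
         (pvB_scan cs j).foldl (fun a d => a * 10 + d) size) := by
  induction j using pvB_scan.induct (cs := cs) with
  | case1 =>
    intro move size
    rw [pvA_loop_base, pvB_scan_base]; simp
  | case2 j hj c h hd ih =>
    intro move size
    rw [pvA_loop_some cs j move size true c hj h, pvB_scan_some cs j c hj h,
      if_pos hd, if_pos hd, if_pos (by trivial : (true = true)), ih]
    simp; ring
  | case3 j hj c h hd =>
    intro move size
    rw [pvA_loop_some cs j move size true c hj h, pvB_scan_some cs j c hj h,
      if_neg hd, if_neg hd]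
    simp
  | case4 j hj h =>
    intro move size
    rw [pvA_loop_none cs j move size true hj h, pvB_scan_none cs j hj h]
    simp

-- A's loop from its initial 'numbering = false' state, in terms of B's digit span
theorem pvA_loop_false (cs : List Char) (j move : Int) :
    pvA_loop cs j move 1 false
      = (move + ((pvB_scan cs j).length : Int),
         if pvB_scan cs j = [] then 1
         else (pvB_scan cs j).foldl (fun a d => a * 10 + d) 0) := by
  by_cases hj : j = (cs.length : Int)
  · subst hj; rw [pvA_loop_base, pvB_scan_base]; simp
  · rcases h : PySem.List.pyGet? cs j with _ | c
    · rw [pvA_loop_none cs j move 1 false hj h, pvB_scan_none cs j hj h]; simp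
    · by_cases hd : '0' ≤ c ∧ c ≤ '9'
      · rw [pvA_loop_some cs j move 1 false c hj h, pvB_scan_some cs j c hj h,
          if_pos hd, if_pos hd, if_neg (by simp : ¬(false = true)), pvA_loop_true]
        simp only [List.foldl_cons, List.length_cons]
        norm_num
        exact ⟨by ring, fun hc => absurd hc (by simp)⟩
      · rw [pvA_loop_some cs j move 1 false c hj h, pvB_scan_some cs j c hj h,
          if_neg hd, if_neg hd]
        simp

-- ===== VERDICT (by name: the statement is the Claim_ definition above) =====
theorem parse_right_bracket_py_spec : Claim_equal_parse_right_bracket_py := by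
  intro formula index _ _
  unfold Spec_parse_right_bracket_py parse_right_bracket_py parse_right_bracket_py_alt
  rw [pvA_loop_false]
  rcases h : pvB_scan formula.toList (index + 1) with _ | ⟨d, tl⟩
  · simp
  · simp only [if_neg, reduceCtorEq, not_false_iff]
    rw [pv_horner_eq_possum]
    simp
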